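-- pv_equiv track=rewrite | github.com/Altu-Bitu-2/Altu_Bitu_yerimso | [4월 8일] 이분탐색/prac1.py | make_wheel
-- ===== SOURCE A (Python) =====
-- def make_wheel(n, record):              # 행운의 바퀴가 있는지 판단하는 함수
--     wheel = ['?'] * n                   # 바퀴의 상태
--     is_available = dict()               # 해당 알파벳을 새로 쓸 수 있는지 확인하는 딕셔너리
--
--     # 모든 알파벳에 대해 우선 True로 저장
--     # ord(문자) = 아스키코드
--     # chr(아스키코드) = 문자
--     ord_a = ord('A')                    # ord_a에 A의 아스키코드를 저장함
--     for i in range(26):                 # 알파벳 개수만큼 반복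
--         is_available[chr(i + ord_a)] = True        # A부터 Z까지 해당 알파벳을 새로 쓸 수 있는지 확인
--
--     idx = 0                             # 화살표가 가르키는 인덱스
--
--     for rot, alpha in record:           # record의 S와 문자쌍 전부 반복
--         idx = (idx - int(rot)) % n      # 바퀴를 회전시켰을 때 현재 화살표가 가리키는 인덱스에서 얼마나 떨어졌는지 확인
--
--
--         if wheel[idx] == alpha:         # 바퀴를 회전시킨 후 같은 알파벳이 바퀴에 써있는 경우
--             continue                    # 다음 record로
--
--         if wheel[idx] != '?' or not is_available[alpha]:   # 다른 알파벳이 써 있거나, 이미 알파벳을 다른 자리에 사용한 경우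
--             return '!'                  # ! 출력
--         wheel[idx] = alpha              # 바퀴를 회전한 위치에 alpha 문자 저장하기
--         is_available[alpha] = False     # alpha 문자를 앞으로 새로 쓸 수 없음
--
--     return ''.join(wheel[idx:] + wheel[:idx])   # wheel 바퀴의 마지막 회전에서 화살표가 가리키는 문자부터 시계방향으로 출력
-- ===== SOURCE B (Python) =====
-- def make_wheel(n, record):
--     # Phase 1: cumulative arrow positions for each record entry
--     idx = 0
--     pairs = []
--     for rot, alpha in record:
--         idx = (idx - int(rot)) % n
--         pairs.append((idx, alpha))
--     # Phase 2: global all-pairs consistency — the record is realisable by a wheel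
--     # iff any two observations agree on position exactly when they agree on letter
--     if any((p1 == p2) != (a1 == a2)
--            for i, (p1, a1) in enumerate(pairs)
--            for (p2, a2) in pairs[i + 1:]):
--         return '!'
--     # Phase 3: paint the wheel and read it off from the final arrow position
--     wheel = ['?'] * n
--     for p, a in pairs:
--         wheel[p] = a
--     return ''.join(wheel[idx:] + wheel[:idx])
-- ===== Notes on version B (the rewrite author's own statement) =====
-- stated objective: alternative
-- what changed: A's single stateful wheel simulation with early abort and an availability dictionary is replaced by a global criterion with no mutable wheel state during validation: compute each entry's cumulative position, then declare the record inconsistent iff some pair of observations agrees on position but not on letter or vice versa (an all-pairs check), then paint the wheel once and rotate. …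
-- outside the precondition, e.g. on make_wheel(1, [('0', '?'), ('0', 'A')]): A returns 'A', B returns '!'; on make_wheel(1, [('0', 'A'), ('0', 'b')]): A returns '!', B returns '!'
import Mathlib
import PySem

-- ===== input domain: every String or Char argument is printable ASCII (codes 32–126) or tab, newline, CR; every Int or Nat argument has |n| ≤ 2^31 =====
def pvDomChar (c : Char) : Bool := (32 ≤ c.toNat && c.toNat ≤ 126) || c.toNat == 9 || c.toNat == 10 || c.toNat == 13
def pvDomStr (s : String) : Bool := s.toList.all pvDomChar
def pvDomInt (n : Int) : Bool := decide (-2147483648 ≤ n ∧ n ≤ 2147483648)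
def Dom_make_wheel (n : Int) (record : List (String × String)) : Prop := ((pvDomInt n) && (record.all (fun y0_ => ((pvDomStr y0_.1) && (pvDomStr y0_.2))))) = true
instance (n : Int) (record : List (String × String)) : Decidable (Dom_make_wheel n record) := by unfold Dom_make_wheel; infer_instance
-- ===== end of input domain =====

-- B replaces A's stateful simulation (mutable wheel + availability dict with early abort) by a global
-- all-pairs consistency criterion over the cumulative positions, then paints the wheel once; equal on Pre_
-- (alternative algorithm, no speed claim).

-- ===== PORT A =====
-- A's availability dict: is_available[chr(i+65)] = True for i in range(26)
def availInit : PySem.Dict String Bool :=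
  (PySem.List.pyRange 0 26 1).foldl
    (fun d i => d.insert (String.ofList [Char.ofNat (i + 65).toNat]) true) PySem.Dict.empty

-- A's main loop; on inputs where Python raises (ValueError / ZeroDivisionError / IndexError / KeyError,
-- all excluded by Pre_) it returns "" as an unreachable marker.
def makeWheelLoopA (n : Int) : List (String × String) → List String → PySem.Dict String Bool → Int → String
  | [], wheel, _, idx =>
      PySem.Str.join "" (PySem.List.slice wheel (some idx) none ++ PySem.List.slice wheel none (some idx))
  | (rot, alpha) :: rest, wheel, avail, idx =>
      match PySem.Int.ofStr? rot with
      | none => ""            -- int(rot): ValueError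
      | some r =>
        if n = 0 then ""      -- % 0: ZeroDivisionError
        else
          let idx' := PySem.Int.mod (idx - r) n
          match PySem.List.pyGet? wheel idx' with
          | none => ""        -- wheel[idx]: IndexError
          | some w =>
            if w = alpha then makeWheelLoopA n rest wheel avail idx'
            else if w ≠ "?" then "!"
            else
              match avail.get? alpha with
              | none => ""    -- is_available[alpha]: KeyError
              | some av =>
                if !av then "!"
                else makeWheelLoopA n rest (PySem.List.pySetD wheel idx' alpha) (avail.insert alpha false) idx'

def make_wheel (n : Int) (record : List (String × String)) : String :=
  makeWheelLoopA n record (List.replicate n.toNat "?") availInit 0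

-- ===== PORT B =====
-- Phase 1: cumulative positions (none = an exception in B's int()/%, excluded by Pre_)
def altPhase1 (n : Int) : List (String × String) → Int → List (Int × String) → Option (Int × List (Int × String))
  | [], idx, acc => some (idx, acc)
  | (rot, alpha) :: rest, idx, acc =>
      match PySem.Int.ofStr? rot with
      | none => none
      | some r =>
        if n = 0 then none
        else
          let idx' := PySem.Int.mod (idx - r) n
          altPhase1 n rest idx' (acc ++ [(idx', alpha)])

-- Phase 2: (p1 == p2) != (a1 == a2) on one pair of observations
def pairBad (p q : Int × String) : Bool := (decide (p.1 = q.1)) != (decide (p.2 = q.2))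

-- the all-pairs check: for each entry, compare it with every later entry (pairs[i+1:])
def anyBad : List (Int × String) → Bool
  | [] => false
  | p :: rest => rest.any (pairBad p) || anyBad rest

-- Phase 3: paint the wheel
def paintWheel (n : Int) (pairs : List (Int × String)) : List String :=
  pairs.foldl (fun w q => PySem.List.pySetD w q.1 q.2) (List.replicate n.toNat "?")

def make_wheel_alt (n : Int) (record : List (String × String)) : String :=
  match altPhase1 n record 0 [] with
  | none => ""
  | some (idx, pairs) =>
    if anyBad pairs then "!"
    else
      let wheel := paintWheel n pairs
      PySem.Str.join "" (PySem.List.slice wheel (some idx) none ++ PySem.List.slice wheel none (some idx))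

-- ===== PRECONDITION & SPEC =====
def isUpperLetter (s : String) : Bool :=
  match s.toList with
  | [c] => decide ('A' ≤ c) && decide (c ≤ 'Z')
  | _ => false

-- Pre_ excludes inputs on which A raises (rotation strings int() rejects; n ≤ 0 with a nonempty record;
-- letters outside A–Z reaching the availability lookup) and, beyond that, records whose letter is not a
-- single uppercase A–Z letter, on which A's surviving return values are artefacts of its '?' sentinel.
def Pre_make_wheel (n : Int) (record : List (String × String)) : Prop :=
  (record = [] ∨ 0 < n) ∧
  ∀ p ∈ record, (PySem.Int.ofStr? p.1).isSome = true ∧ isUpperLetter p.2 = true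
instance (n : Int) (record : List (String × String)) : Decidable (Pre_make_wheel n record) := by
  unfold Pre_make_wheel; infer_instance

def pvWitness_make_wheel : Int × (List (String × String)) := (3, [("1", "A"), ("2", "B")])

def Spec_make_wheel (n : Int) (record : List (String × String)) (out : String) : Prop := out = make_wheel_alt n record
instance (n : Int) (record : List (String × String)) (out : String) : Decidable (Spec_make_wheel n record out) := by unfold Spec_make_wheel; infer_instance

-- ===== CLAIM (what is proved, stated in full; the proofs are below) =====
def Claim_equal_make_wheel : Prop := ∀ (n : Int) (record : List (String × String)), Dom_make_wheel n record → Pre_make_wheel n record → Spec_make_wheel n record (make_wheel n record)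

-- ===== LEMMAS AND PROOFS =====

theorem upper_ne_qmark {s : String} (h : isUpperLetter s = true) : s ≠ "?" := by
  intro he; subst he; simp [isUpperLetter] at h

theorem upper_shape {s : String} (h : isUpperLetter s = true) :
    ∃ c, s = String.ofList [c] ∧ 'A' ≤ c ∧ c ≤ 'Z' := by
  unfold isUpperLetter at h
  rcases hl : s.toList with _ | ⟨c, _ | ⟨d, t⟩⟩ <;> rw [hl] at h <;> simp at h
  exact ⟨c, by rw [← hl]; exact String.ofList_toList.symm, h.1, h.2⟩

theorem availInit_eq : availInit = PySem.Dict.mk ((PySem.List.pyRange 0 26 1).map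
    (fun i => (String.ofList [Char.ofNat (i + 65).toNat], true))) := by
  apply PySem.Dict.ext
  show PySem.Dict.items (List.foldl _ _ _) = _
  rw [PySem.Dict.items_foldl_insert_fresh (PySem.List.pyRange 0 26 1)
        (fun i => String.ofList [Char.ofNat (i + 65).toNat]) (fun _ => true) PySem.Dict.empty
        (by intro a _; simp [PySem.Dict.contains_empty]) (by decide)]
  simp [PySem.Dict.empty]

theorem availInit_get {c : Char} (h1 : 'A' ≤ c) (h2 : c ≤ 'Z') :
    availInit.get? (String.ofList [c]) = some true := by
  have h1' : 65 ≤ c.toNat := h1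
  have h2' : c.toNat ≤ 90 := h2
  rw [availInit_eq]
  apply PySem.Dict.get?_of_mem_items
  · refine List.mem_map.mpr ⟨((c.toNat : Int) - 65), ?_, ?_⟩
    · rw [PySem.List.mem_pyRange_one]; omega
    · have h : ((c.toNat : Int) - 65 + 65).toNat = c.toNat := by omega
      rw [h, Char.ofNat_toNat]
  · simp only [PySem.Dict.keys]
    decide

theorem altPhase1_acc (n : Int) :
    ∀ (rest : List (String × String)) (idx : Int) (acc : List (Int × String)),
      altPhase1 n rest idx acc = (altPhase1 n rest idx []).map (fun r => (r.1, acc ++ r.2)) := by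
  intro rest
  induction rest with
  | nil => intro idx acc; simp [altPhase1]
  | cons p rest ih =>
      intro idx acc
      obtain ⟨rot, alpha⟩ := p
      simp only [altPhase1]
      cases PySem.Int.ofStr? rot with
      | none => simp
      | some r =>
          simp only
          by_cases hn : n = 0
          · simp [hn]
          · simp only [hn, if_false]
            rw [ih _ (acc ++ _), ih _ ([] ++ _)]
            cases altPhase1 n rest (PySem.Int.mod (idx - r) n) [] with
            | none => simp
            | some q => simp

theorem altPhase1_isSome (n : Int) (hn : n ≠ 0) :
    ∀ (rest : List (String × String)) (idx : Int),
      (∀ p ∈ rest, (PySem.Int.ofStr? p.1).isSome = true) →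
      (altPhase1 n rest idx []).isSome = true := by
  intro rest
  induction rest with
  | nil => intro idx _; simp [altPhase1]
  | cons p rest ih =>
      intro idx hg
      obtain ⟨rot, alpha⟩ := p
      obtain ⟨r, hr⟩ := Option.isSome_iff_exists.mp (hg (rot, alpha) (by simp))
      simp only [altPhase1, hr, hn, if_false]
      rw [altPhase1_acc, Option.isSome_map]
      exact ih _ (fun q hq => hg q (by simp [hq]))

theorem mod_bounds {a n : Int} (hn : 0 < n) :
    0 ≤ PySem.Int.mod a n ∧ PySem.Int.mod a n < n := by
  rw [PySem.Int.mod_eq_emod_of_pos hn]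
  exact ⟨Int.emod_nonneg a (by omega), Int.emod_lt_of_pos a hn⟩

theorem pairBad_symm (p q : Int × String) : pairBad p q = pairBad q p := by
  have h1 : (decide (p.1 = q.1)) = (decide (q.1 = p.1)) := by simp [eq_comm]
  have h2 : (decide (p.2 = q.2)) = (decide (q.2 = p.2)) := by simp [eq_comm]
  simp only [pairBad, h1, h2]

theorem pairBad_self (p : Int × String) : pairBad p p = false := by
  simp [pairBad]

theorem anyBad_append (l1 l2 : List (Int × String)) :
    anyBad (l1 ++ l2) = (anyBad l1 || anyBad l2 || l1.any (fun p => l2.any (pairBad p))) := by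
  induction l1 with
  | nil => simp [anyBad]
  | cons x l1 ih =>
      simp only [List.cons_append, anyBad, ih, List.any_cons, List.any_append]
      cases anyBad l1 <;> cases anyBad l2 <;> cases l2.any (pairBad x) <;>
        cases l1.any (pairBad x) <;> cases l1.any (fun p => l2.any (pairBad p)) <;> rfl

theorem anyBad_false_of_mem {l : List (Int × String)} (hc : anyBad l = false) {x : Int × String}
    (hx : x ∈ l) : ∀ p ∈ l, pairBad p x = false := by
  induction l with
  | nil => intro p hp; cases hp
  | cons d rest ih =>
      simp only [anyBad, Bool.or_eq_false_iff] at hc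
      obtain ⟨hc1, hc2⟩ := hc
      intro p hp
      rcases List.mem_cons.mp hp with hpd | hpr
      · subst hpd
        rcases List.mem_cons.mp hx with hxd | hxr
        · subst hxd; exact pairBad_self _
        · simpa using List.any_eq_false.mp hc1 x hxr
      · rcases List.mem_cons.mp hx with hxd | hxr
        · subst hxd
          rw [pairBad_symm]
          simpa using List.any_eq_false.mp hc1 p hpr
        · exact ih hc2 hxr p hpr

theorem set_self {l : List String} {k : Nat} {v : String} (h : l[k]? = some v) :
    l.set k v = l := by
  apply List.ext_getElem
  · simp
  · intro i h1 h2
    rw [List.getElem_set]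
    split_ifs with hk
    · subst hk
      have := List.getElem?_eq_getElem h2
      rw [this] at h
      exact (Option.some_inj.mp h).symm
    · rfl

-- the coupling invariant: A's state (wheel, avail) encodes exactly the processed pairs 'done'
def WInv (n : Int) (wheel : List String) (avail : PySem.Dict String Bool)
    (done : List (Int × String)) : Prop :=
  wheel.length = n.toNat ∧
  anyBad done = false ∧
  wheel = paintWheel n done ∧
  (∀ i : Int, 0 ≤ i → i < n → ∃ w, PySem.List.pyGet? wheel i = some w ∧
      (w ≠ "?" → (i, w) ∈ done) ∧ (w = "?" → ∀ a, (i, a) ∉ done)) ∧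
  (∀ a : String, isUpperLetter a = true →
      avail.get? a = some (done.all (fun q => !(q.2 == a))))

theorem paintWheel_append (n : Int) (l1 l2 : List (Int × String)) :
    paintWheel n (l1 ++ l2) = l2.foldl (fun w q => PySem.List.pySetD w q.1 q.2) (paintWheel n l1) := by
  simp [paintWheel, List.foldl_append]

theorem master (n : Int) (hn : 0 < n) :
    ∀ (rest : List (String × String)) (wheel : List String) (avail : PySem.Dict String Bool)
      (done : List (Int × String)) (idx : Int),
      (∀ p ∈ rest, (PySem.Int.ofStr? p.1).isSome = true ∧ isUpperLetter p.2 = true) →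
      WInv n wheel avail done →
      makeWheelLoopA n rest wheel avail idx =
        (match altPhase1 n rest idx [] with
         | none => ""
         | some (fidx, pairs) =>
           if anyBad (done ++ pairs) then "!"
           else
             let wheel' := paintWheel n (done ++ pairs)
             PySem.Str.join "" (PySem.List.slice wheel' (some fidx) none ++ PySem.List.slice wheel' none (some fidx))) := by
  intro rest
  induction rest with
  | nil =>
      intro wheel avail done idx _ hInv
      obtain ⟨_, hC, hwf, _, _⟩ := hInv
      simp only [makeWheelLoopA, altPhase1, List.append_nil, hC, Bool.false_eq_true, if_false, ← hwf]
  | cons p rest ih =>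
      intro wheel avail done idx hg hInv
      obtain ⟨rot, alpha⟩ := p
      obtain ⟨hro, hup⟩ := hg (rot, alpha) (by simp)
      obtain ⟨r, hr⟩ := Option.isSome_iff_exists.mp hro
      have hg' : ∀ q ∈ rest, (PySem.Int.ofStr? q.1).isSome = true ∧ isUpperLetter q.2 = true :=
        fun q hq => hg q (by simp [hq])
      have hn0 : n ≠ 0 := by omega
      obtain ⟨hlen, hC, hwf, hmem, havail⟩ := hInv
      simp only [makeWheelLoopA, altPhase1, hr, hn0, if_false]
      rw [altPhase1_acc]
      generalize hgen : PySem.Int.mod (idx - r) n = idx'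
      obtain ⟨hi0, hiN⟩ : 0 ≤ idx' ∧ idx' < n := hgen ▸ mod_bounds (a := idx - r) hn
      obtain ⟨⟨fidx, pairs⟩, hres⟩ :=
        Option.isSome_iff_exists.mp (altPhase1_isSome n hn0 rest idx' (fun q hq => (hg' q hq).1))
      rw [hres]
      obtain ⟨w, hwv, hwdone, hwq⟩ := hmem idx' hi0 hiN
      simp only [Option.map_some, List.nil_append, List.singleton_append, hwv]
      have hne_q : alpha ≠ "?" := upper_ne_qmark hup
      have hassoc : done ++ (idx', alpha) :: pairs = (done ++ [(idx', alpha)]) ++ pairs := by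
        simp
      by_cases hwα : w = alpha
      · -- same letter already there: A continues with unchanged state
        subst hwα
        rw [if_pos rfl]
        have hx : (idx', w) ∈ done := hwdone hne_q
        have hC' : anyBad (done ++ [(idx', w)]) = false := by
          rw [anyBad_append]
          simp only [anyBad, List.any_nil, Bool.or_false, hC, Bool.false_or]
          refine List.any_eq_false.mpr (fun p hp => ?_)
          simp only [List.any_cons, List.any_nil, Bool.or_false]
          simp [anyBad_false_of_mem hC hx p hp]
        have hwf' : wheel = paintWheel n (done ++ [(idx', w)]) := by
          rw [paintWheel_append]
          simp only [List.foldl_cons, List.foldl_nil, ← hwf]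
          rw [PySem.List.pySetD_of_nonneg _ _ hi0]
          apply (set_self _).symm
          rw [← PySem.List.pyGet?_of_nonneg _ hi0]
          exact hwv
        have hInv' : WInv n wheel avail (done ++ [(idx', w)]) := by
          refine ⟨hlen, hC', hwf', ?_, ?_⟩
          · intro i h0 hN
            obtain ⟨w2, hw2, hw2d, hw2q⟩ := hmem i h0 hN
            refine ⟨w2, hw2, fun hq => List.mem_append_left _ (hw2d hq), fun hq a ha => ?_⟩
            rcases List.mem_append.mp ha with ha1 | ha2
            · exact hw2q hq a ha1
            · simp only [List.mem_singleton, Prod.mk.injEq] at ha2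
              obtain ⟨hie, -⟩ := ha2
              rw [hie] at hw2
              have hww : w2 = w := Option.some_inj.mp (hw2.symm.trans hwv)
              exact hne_q (hww.symm.trans hq)
          · intro a hau
            rw [havail a hau, List.all_append]
            simp only [List.all_cons, List.all_nil, Bool.and_true]
            by_cases hae : w = a
            · subst hae
              have : done.all (fun q => !(q.2 == w)) = false := by
                refine List.all_eq_false.mpr ⟨(idx', w), hx, by simp⟩
              simp [this]
            · simp [hae]
        rw [ih wheel avail _ idx' hg' hInv', hres, hassoc]
      · -- a different letter than the wheel shows
        rw [if_neg hwα]
        by_cases hwq' : w = "?"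
        · -- the position is free; does A still know the letter elsewhere?
          subst hwq'
          rw [if_neg (by simp)]
          obtain ⟨c, hc, hc1, hc2⟩ := upper_shape hup
          have hav : avail.get? alpha = some (done.all (fun q => !(q.2 == alpha))) := havail alpha hup
          simp only [hav]
          cases hall : done.all (fun q => !(q.2 == alpha)) with
          | false =>
              -- the letter is already used elsewhere: both return '!'
              rw [if_pos (by simp)]
              obtain ⟨p, hp, hpa⟩ := List.all_eq_false.mp hall
              simp only [Bool.not_eq_eq_eq_not, Bool.not_true, beq_eq_false_iff_ne, ne_eq,
                Decidable.not_not] at hpa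
              have hp1 : p.1 ≠ idx' := by
                intro he
                exact hwq rfl p.2 (by rw [← he]; simpa using hp)
              have hbadp : pairBad p (idx', alpha) = true := by
                simp [pairBad, hp1, hpa]
              have : anyBad (done ++ (idx', alpha) :: pairs) = true := by
                rw [anyBad_append]
                refine Bool.or_eq_true_iff.mpr (Or.inr ?_)
                refine List.any_eq_true.mpr ⟨p, hp, ?_⟩
                simp [hbadp]
              rw [this]
              simp
          | true =>
              -- fresh letter at a fresh position: A writes it, B's check stays clean
              rw [if_neg (by simp)]
              have hnb : ∀ p ∈ done, pairBad p (idx', alpha) = false := by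
                intro p hp
                have hp1 : p.1 ≠ idx' := by
                  intro he
                  exact hwq rfl p.2 (by rw [← he]; simpa using hp)
                have hp2 : p.2 ≠ alpha := by
                  intro he
                  have := List.all_eq_true.mp hall p hp
                  simp [he] at this
                simp [pairBad, hp1, hp2]
              have hC' : anyBad (done ++ [(idx', alpha)]) = false := by
                rw [anyBad_append]
                simp only [anyBad, List.any_nil, Bool.or_false, hC, Bool.false_or]
                refine List.any_eq_false.mpr (fun p hp => ?_)
                simp only [List.any_cons, List.any_nil, Bool.or_false]
                simp [hnb p hp]
              have hidxlen : idx'.toNat < wheel.length := by rw [hlen]; omega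
              have hwf' : PySem.List.pySetD wheel idx' alpha = paintWheel n (done ++ [(idx', alpha)]) := by
                rw [paintWheel_append]
                simp only [List.foldl_cons, List.foldl_nil, ← hwf]
              have hInv' : WInv n (PySem.List.pySetD wheel idx' alpha) (avail.insert alpha false)
                  (done ++ [(idx', alpha)]) := by
                refine ⟨by rw [PySem.List.pySetD_of_nonneg _ _ hi0, List.length_set, hlen],
                  hC', hwf', ?_, ?_⟩
                · intro i h0 hN
                  obtain ⟨w2, hw2, hw2d, hw2q⟩ := hmem i h0 hN
                  by_cases hie : i = idx'
                  · subst hie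
                    refine ⟨alpha, ?_, fun _ => List.mem_append_right _ (by simp), fun hq => absurd hq hne_q⟩
                    rw [PySem.List.pySetD_of_nonneg _ _ h0, PySem.List.pyGet?_of_nonneg _ h0,
                        List.getElem?_set]
                    simp [hidxlen]
                  · refine ⟨w2, ?_, fun hq => List.mem_append_left _ (hw2d hq), fun hq a ha => ?_⟩
                    · rw [PySem.List.pySetD_of_nonneg _ _ hi0, PySem.List.pyGet?_of_nonneg _ h0,
                          List.getElem?_set]
                      have hne' : ¬ (idx'.toNat = i.toNat) := by omega
                      rw [if_neg hne', ← PySem.List.pyGet?_of_nonneg _ h0]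
                      exact hw2
                    · rcases List.mem_append.mp ha with ha1 | ha2
                      · exact hw2q hq a ha1
                      · simp only [List.mem_singleton, Prod.mk.injEq] at ha2
                        exact hie (by omega)
                · intro a hau
                  rw [PySem.Dict.get?_insert, List.all_append]
                  simp only [List.all_cons, List.all_nil, Bool.and_true]
                  split_ifs with hae
                  · subst hae; simp
                  · rw [havail a hau]
                    have : (alpha == a) = false := by
                      simp only [beq_eq_false_iff_ne, ne_eq]
                      exact fun he => hae he.symm
                    simp [this]
              rw [ih _ _ _ idx' hg' hInv', hres, hassoc]
        · -- a different letter is already written there: both return '!'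
          rw [if_pos hwq']
          have hx : (idx', w) ∈ done := hwdone hwq'
          have hbadp : pairBad (idx', w) (idx', alpha) = true := by
            have hne : w ≠ alpha := hwα
            simp [pairBad, hne]
          have : anyBad (done ++ (idx', alpha) :: pairs) = true := by
            rw [anyBad_append]
            refine Bool.or_eq_true_iff.mpr (Or.inr ?_)
            refine List.any_eq_true.mpr ⟨(idx', w), hx, ?_⟩
            simp [hbadp]
          rw [this]
          simp

-- ===== VERDICT (by name: the statement is the Claim_ definition above) =====
theorem make_wheel_spec : Claim_equal_make_wheel := by
  intro n record _hdom hpre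
  unfold Spec_make_wheel
  obtain ⟨hnr, hg⟩ := hpre
  rcases hnr with hrec | hn
  · subst hrec
    simp [make_wheel, make_wheel_alt, makeWheelLoopA, altPhase1, anyBad, paintWheel]
  · have h := master n hn record (List.replicate n.toNat "?") availInit [] 0 hg ?_
    · rw [make_wheel, h, make_wheel_alt]
      simp only [List.nil_append]
    · refine ⟨by simp, rfl, by simp [paintWheel], ?_, ?_⟩
      · intro i h0 hN
        refine ⟨"?", ?_, fun hq => absurd rfl hq, fun _ a ha => (List.not_mem_nil ha).elim⟩
        rw [PySem.List.pyGet?_of_nonneg _ h0, List.getElem?_replicate]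
        have : i.toNat < n.toNat := by omega
        rw [if_pos this]
      · intro a hau
        obtain ⟨c, hc, hc1, hc2⟩ := upper_shape hau
        rw [hc, availInit_get hc1 hc2]
        simp
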